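-- pv_equiv track=rewrite | github.com/edt-yxz-zzd/python3_src | seed/math/sqrts_mod_.py | _decompose__half_down_
-- ===== SOURCE A (Python) =====
-- def _decompose__half_down_(k0, k, /):
--     #half_down
--     assert k >= k0 >= 1
--     # [k >= k0 >= 1]
--     k_ = k
--     ks = [k_]
--     # [k_ >= k0 >= 1]
--     #while not k_ == 1:
--     while k_ > k0:
--         # [k_ > k0 >= 1]
--         # [k_ >= 2]
--         # [k_ > (k_+1)//2 >= 1]
--         #   ==>> loop halt
--         k_ = (k_+1)//2
--         ks.append(k_)
--         # [k_ >= 1]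
--         # may have:[k_ <= k0]
--     if k_ < k0:
--         ks[-1] = k0
--     ks.reverse()
--     assert ks[0] == k0
--     assert ks[-1] == k
--     return ks
-- ===== SOURCE B (Python) =====
-- def _decompose__half_down_(k0, k, /):
--     assert k >= k0 >= 1
--     # closed form: the chain values are ceil(k / 2**i); m = number of them above k0,
--     # computed directly from ceil(k/k0) via bit_length.
--     m = (-(-k // k0) - 1).bit_length()
--     return [k0] + [-(-k // 2**i) for i in reversed(range(m))]
-- ===== Notes on version B (the rewrite author's own statement) =====
-- stated objective: alternative
-- what changed: Replaces the iterative append/last-element-fixup/reverse loop with a closed form: the chain values are ceil(k/2**i), their count m is computed once from bit_length of ceil(k/k0)-1, and the list is a single comprehension over reversed(range(m)).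
import Mathlib
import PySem

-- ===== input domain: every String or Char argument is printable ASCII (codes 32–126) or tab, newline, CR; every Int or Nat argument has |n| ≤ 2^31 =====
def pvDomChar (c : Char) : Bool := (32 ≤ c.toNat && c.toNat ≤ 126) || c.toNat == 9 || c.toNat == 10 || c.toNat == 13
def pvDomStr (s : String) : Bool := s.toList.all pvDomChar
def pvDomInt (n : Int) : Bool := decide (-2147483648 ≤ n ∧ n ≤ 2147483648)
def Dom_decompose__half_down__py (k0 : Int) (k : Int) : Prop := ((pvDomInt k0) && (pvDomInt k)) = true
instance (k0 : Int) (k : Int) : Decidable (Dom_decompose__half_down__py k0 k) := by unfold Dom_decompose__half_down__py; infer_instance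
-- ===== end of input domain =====

-- B replaces A's iterative append/last-element-fixup/reverse loop with a closed form: the chain
-- values are ceil(k/2^i), their count is computed from bit_length, and the list is one map (alternative, similar cost).


-- ===== PORT A =====
-- while k_ > k0: k_ = (k_+1)//2; ks.append(k_)   (guard 1 ≤ k0 added only for Lean termination;
-- inside Pre_ it always holds, matching Python's loop exactly)
def pvALoop (k0 : Int) (k_ : Int) (ks : List Int) : Int × List Int :=
  if h : k0 < k_ ∧ 1 ≤ k0 then
    pvALoop k0 (PySem.Int.floordiv (k_ + 1) 2) (ks ++ [PySem.Int.floordiv (k_ + 1) 2])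
  else (k_, ks)
termination_by (k_ - k0).toNat
decreasing_by
  all_goals
    have hb : PySem.Int.floordiv (k_ + 1) 2 < k_ := by
      rw [PySem.Int.floordiv_eq_ediv_of_pos (by omega)]; omega
    omega

def decompose__half_down__py (k0 : Int) (k : Int) : List Int :=
  let r := pvALoop k0 k [k]
  let ks := if r.1 < k0 then r.2.dropLast ++ [k0] else r.2   -- ks[-1] = k0
  ks.reverse

-- ===== PORT B =====
-- -(-k // b) : Python ceiling division
def pvCeilDiv (a b : Int) : Int := -(PySem.Int.floordiv (-a) b)

-- m = (-(-k // k0) - 1).bit_length(); [k0] + [-(-k // 2**i) for i in reversed(range(m))]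
def decompose__half_down__py_alt (k0 : Int) (k : Int) : List Int :=
  let m : Nat := PySem.Int.bitLength (pvCeilDiv k k0 - 1)
  k0 :: (List.range m).reverse.map (fun i => pvCeilDiv k (2 ^ i))

-- ===== PRECONDITION & SPEC =====
-- Python A asserts k >= k0 >= 1 and raises AssertionError otherwise.
def Pre_decompose__half_down__py (k0 : Int) (k : Int) : Prop := 1 ≤ k0 ∧ k0 ≤ k
instance (k0 : Int) (k : Int) : Decidable (Pre_decompose__half_down__py k0 k) := by unfold Pre_decompose__half_down__py; infer_instance
def pvWitness_decompose__half_down__py : Int × Int := (3, 100)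
def Spec_decompose__half_down__py (k0 : Int) (k : Int) (out : List Int) : Prop := out = decompose__half_down__py_alt k0 k
instance (k0 : Int) (k : Int) (out : List Int) : Decidable (Spec_decompose__half_down__py k0 k out) := by unfold Spec_decompose__half_down__py; infer_instance

-- ===== CLAIM (what is proved, stated in full; the proofs are below) =====
def Claim_equal_decompose__half_down__py : Prop := ∀ (k0 : Int) (k : Int), Dom_decompose__half_down__py k0 k → Pre_decompose__half_down__py k0 k → Spec_decompose__half_down__py k0 k (decompose__half_down__py k0 k)

-- ===== LEMMAS AND PROOFS =====

-- proof-side helper: the ceil-halving chain as a recursion (bridge between the two ports)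
def pvBRecur (k0 : Int) (cur : Int) : List Int :=
  if h : k0 < cur ∧ 1 ≤ k0 then
    pvBRecur k0 (PySem.Int.floordiv (cur + 1) 2) ++ [cur]
  else [k0]
termination_by (cur - k0).toNat
decreasing_by
  have hb : PySem.Int.floordiv (cur + 1) 2 < cur := by
    rw [PySem.Int.floordiv_eq_ediv_of_pos (by omega)]; omega
  omega

-- the accumulator of pvALoop is a pure prefix
theorem pvALoop_acc (k0 k_ : Int) (ks : List Int) :
    pvALoop k0 k_ ks = ((pvALoop k0 k_ []).1, ks ++ (pvALoop k0 k_ []).2) := by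
  by_cases h : k0 < k_ ∧ 1 ≤ k0
  · rw [pvALoop]; conv_rhs => rw [pvALoop]
    rw [dif_pos h, dif_pos h,
        pvALoop_acc k0 (PySem.Int.floordiv (k_ + 1) 2) (ks ++ [PySem.Int.floordiv (k_ + 1) 2]),
        pvALoop_acc k0 (PySem.Int.floordiv (k_ + 1) 2) ([] ++ [PySem.Int.floordiv (k_ + 1) 2])]
    simp
  · rw [pvALoop]; conv_rhs => rw [pvALoop]
    rw [dif_neg h, dif_neg h]; simp
termination_by (k_ - k0).toNat
decreasing_by
  all_goals
    have hb : PySem.Int.floordiv (k_ + 1) 2 < k_ := by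
      rw [PySem.Int.floordiv_eq_ediv_of_pos (by omega)]; omega
    omega

-- A's post-processed, reversed loop result equals the ceil-halving recursion
theorem pv_main (k0 k_ : Int) (h0 : 1 ≤ k0) (h1 : 1 ≤ k_) :
    (if (pvALoop k0 k_ [k_]).1 < k0 then (pvALoop k0 k_ [k_]).2.dropLast ++ [k0]
     else (pvALoop k0 k_ [k_]).2).reverse = pvBRecur k0 k_ := by
  by_cases h : k0 < k_ ∧ 1 ≤ k0
  · have h1' : (1:Int) ≤ PySem.Int.floordiv (k_ + 1) 2 := by
      rw [PySem.Int.floordiv_eq_ediv_of_pos (by omega)]; omega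
    have ih := pv_main k0 (PySem.Int.floordiv (k_ + 1) 2) h0 h1'
    rw [pvALoop, dif_pos h,
        pvALoop_acc k0 (PySem.Int.floordiv (k_ + 1) 2) ([k_] ++ [PySem.Int.floordiv (k_ + 1) 2]),
        pvBRecur, dif_pos h]
    rw [pvALoop_acc k0 (PySem.Int.floordiv (k_ + 1) 2) [PySem.Int.floordiv (k_ + 1) 2]] at ih
    rw [← ih]
    generalize pvALoop k0 (PySem.Int.floordiv (k_ + 1) 2) [] = r
    obtain ⟨f, t⟩ := r
    by_cases hc : f < k0 <;> simp [hc]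
  · rw [pvALoop, dif_neg h, pvBRecur, dif_neg h]
    have hk : k_ ≤ k0 := by omega
    by_cases hc : k_ < k0 <;> simp [hc]
    omega
termination_by (k_ - k0).toNat
decreasing_by
  all_goals
    have hb : PySem.Int.floordiv (k_ + 1) 2 < k_ := by
      rw [PySem.Int.floordiv_eq_ediv_of_pos (by omega)]; omega
    omega

-- order characterisation of ceiling division
theorem pvCeilDiv_le (a b x : Int) (hb : 0 < b) : pvCeilDiv a b ≤ x ↔ a ≤ x * b := by
  unfold pvCeilDiv
  rw [neg_le, PySem.Int.le_floordiv_iff_mul_le hb, neg_mul, neg_le_neg_iff]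

theorem pvCeilDiv_one (a : Int) : pvCeilDiv a 1 = a := by
  unfold pvCeilDiv
  rw [PySem.Int.floordiv_eq_ediv_of_pos (by omega)]
  omega

theorem pvCeilDiv_two (a : Int) : pvCeilDiv a 2 = PySem.Int.floordiv (a + 1) 2 := by
  unfold pvCeilDiv
  rw [PySem.Int.floordiv_eq_ediv_of_pos (a := -a) (by omega),
      PySem.Int.floordiv_eq_ediv_of_pos (by omega)]
  omega

theorem pvCeilDiv_comp (a b c : Int) (hb : 0 < b) (hc : 0 < c) :
    pvCeilDiv (pvCeilDiv a b) c = pvCeilDiv a (b * c) := by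
  have hbc : (0:Int) < b * c := by positivity
  apply le_antisymm
  · rw [pvCeilDiv_le _ _ _ hc, pvCeilDiv_le _ _ _ hb]
    have h2 := (pvCeilDiv_le a (b * c) _ hbc).mp le_rfl
    nlinarith
  · rw [pvCeilDiv_le _ _ _ hbc]
    have h1 := (pvCeilDiv_le (pvCeilDiv a b) c _ hc).mp le_rfl
    have h2 := (pvCeilDiv_le a b _ hb).mp le_rfl
    nlinarith [mul_le_mul_of_nonneg_right h1 hb.le]

-- bit_length of a nonnegative integer: bitLength n ≤ i ↔ n < 2^i
theorem pv_bitLength_le (n : Int) (hn : 0 ≤ n) (i : Nat) :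
    PySem.Int.bitLength n ≤ i ↔ n < (2 : Int) ^ i := by
  have h4 : (((2:Nat) ^ i : Nat) : Int) = (2:Int) ^ i := by push_cast; ring
  constructor
  · intro h
    have h1 := PySem.Int.lt_two_pow_bitLength n
    have h2 : (2:Nat) ^ PySem.Int.bitLength n ≤ 2 ^ i := Nat.pow_le_pow_right (by omega) h
    have h3 : n.natAbs < 2 ^ i := lt_of_lt_of_le h1 h2
    omega
  · intro h
    by_contra hc
    push_neg at hc
    have hne : n ≠ 0 := by
      intro h0
      rw [h0, PySem.Int.bitLength_zero] at hc
      omega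
    have h1 := PySem.Int.two_pow_bitLength_le n hne
    have h2 : (2:Nat) ^ i ≤ 2 ^ (PySem.Int.bitLength n - 1) := Nat.pow_le_pow_right (by omega) (by omega)
    omega

-- m-count characterisation: pvM k0 k ≤ i ↔ k ≤ k0 * 2^i
theorem pv_m_le (k0 k : Int) (h0 : 1 ≤ k0) (h1 : 1 ≤ k) (i : Nat) :
    PySem.Int.bitLength (pvCeilDiv k k0 - 1) ≤ i ↔ k ≤ k0 * (2 : Int) ^ i := by
  have hcd : 1 ≤ pvCeilDiv k k0 := by
    by_contra hc
    push_neg at hc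
    have := (pvCeilDiv_le k k0 0 (by omega)).mp (by omega)
    omega
  rw [pv_bitLength_le _ (by omega) i]
  have h2 : (0:Int) < 2 ^ i := by positivity
  constructor
  · intro h
    have := (pvCeilDiv_le k k0 (2 ^ i) (by omega)).mp (by omega)
    linarith [this, mul_comm ((2:Int)^i) k0]
  · intro h
    have := (pvCeilDiv_le k k0 (2 ^ i) (by omega)).mpr (by linarith [mul_comm k0 ((2:Int)^i)])
    omega

-- the closed form equals the ceil-halving recursion
theorem pvB_closed (k0 k : Int) (h0 : 1 ≤ k0) (h1 : 1 ≤ k) :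
    pvBRecur k0 k = decompose__half_down__py_alt k0 k := by
  by_cases h : k0 < k ∧ 1 ≤ k0
  · have hk2 : (2:Int) ≤ k := by omega
    set k' := PySem.Int.floordiv (k + 1) 2 with hk'
    have hk'c : k' = pvCeilDiv k 2 := (pvCeilDiv_two k).symm
    have h1' : (1:Int) ≤ k' := by
      rw [hk', PySem.Int.floordiv_eq_ediv_of_pos (by omega)]; omega
    have ih := pvB_closed k0 k' h0 h1'
    rw [pvBRecur, dif_pos h, ih]
    unfold decompose__half_down__py_alt
    -- m = m' + 1
    have hm : PySem.Int.bitLength (pvCeilDiv k k0 - 1)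
        = PySem.Int.bitLength (pvCeilDiv k' k0 - 1) + 1 := by
      have ha : ∀ i : Nat, PySem.Int.bitLength (pvCeilDiv k' k0 - 1) ≤ i ↔
          PySem.Int.bitLength (pvCeilDiv k k0 - 1) ≤ i + 1 := by
        intro i
        rw [pv_m_le k0 k' h0 h1' i, pv_m_le k0 k h0 h1 (i + 1)]
        rw [hk'c, pvCeilDiv_le k 2 (k0 * 2 ^ i) (by omega)]
        rw [pow_succ]
        constructor <;> intro hx <;> nlinarith
      have hpos : 1 ≤ PySem.Int.bitLength (pvCeilDiv k k0 - 1) := by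
        by_contra hc
        push_neg at hc
        have := (pv_m_le k0 k h0 h1 0).mp (by omega)
        simp at this
        omega
      have u1 := (ha (PySem.Int.bitLength (pvCeilDiv k k0 - 1) - 1)).mpr (by omega)
      have u2 := (ha (PySem.Int.bitLength (pvCeilDiv k' k0 - 1))).mp le_rfl
      omega
    rw [hm]
    set m' := PySem.Int.bitLength (pvCeilDiv k' k0 - 1) with hm'
    show (k0 :: List.map (fun i => pvCeilDiv k' (2 ^ i)) (List.range m').reverse) ++ [k]
        = k0 :: List.map (fun i => pvCeilDiv k (2 ^ i)) (List.range (m' + 1)).reverse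
    -- unfold range (m'+1) : reversed range maps
    have hmap : (fun i => pvCeilDiv k (2 ^ i)) ∘ Nat.succ = fun i => pvCeilDiv k' (2 ^ i) := by
      funext i
      simp only [Function.comp_apply, Nat.succ_eq_add_one]
      rw [hk'c, pvCeilDiv_comp k 2 (2 ^ i) (by omega) (by positivity), ← pow_succ']
    rw [List.range_succ_eq_map, List.reverse_cons, List.map_append]
    simp only [List.map_reverse]
    rw [List.map_map, hmap]
    simp [pvCeilDiv_one]
  · rw [pvBRecur, dif_neg h]
    unfold decompose__half_down__py_alt
    have hm0 : PySem.Int.bitLength (pvCeilDiv k k0 - 1) = 0 := by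
      have := (pv_m_le k0 k h0 h1 0).mpr (by push_neg at h; simp; omega)
      omega
    rw [hm0]
    simp
termination_by (k - k0).toNat
decreasing_by
  have hb : PySem.Int.floordiv (k + 1) 2 < k := by
    rw [PySem.Int.floordiv_eq_ediv_of_pos (by omega)]; omega
  omega

-- ===== VERDICT (by name: the statement is the Claim_ definition above) =====
theorem decompose__half_down__py_spec : Claim_equal_decompose__half_down__py := by
  intro k0 k _ hpre
  unfold Spec_decompose__half_down__py decompose__half_down__py
  rw [pv_main k0 k hpre.1 (le_trans hpre.1 hpre.2)]
  exact pvB_closed k0 k hpre.1 (le_trans hpre.1 hpre.2)
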